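-- pv_equiv track=rewrite | github.com/DSC-Capstone/projects-2020-2021 | projects/project_72/src/data/format_data_reddit.py | make_content_search
-- ===== SOURCE A (Python) =====
-- def make_content_search(search_terms):
--     #Initialize a dictionary
--     content_ls ={}
--     #Add search terms to dictionary with numbered key
--     for i in range(len(search_terms)):
--         term = search_terms[i]
--         if len(term) > 3:
--             char = term[:4]
--             if char in content_ls:
--                 content_ls[char].update({i:term.strip().lower()})
--             else:
--                 content_ls[char] = {i:term.strip().lower()}
--     return content_ls
-- ===== SOURCE B (Python) =====
-- def make_content_search(search_terms):
--     # Two-pass grouping: collect qualifying (index, term) pairs once, list the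
--     # distinct prefixes in first-occurrence order, then build each bucket by
--     # a comprehension over the pairs.
--     pairs = [(i, t) for i, t in enumerate(search_terms) if len(t) > 3]
--     prefixes = []
--     for _, t in pairs:
--         if t[:4] not in prefixes:
--             prefixes.append(t[:4])
--     return {p: {i: t.strip().lower() for i, t in pairs if t[:4] == p}
--             for p in prefixes}
-- ===== Notes on version B (the rewrite author's own statement) =====
-- stated objective: alternative
-- what changed: A builds the nested dict in one pass, updating buckets in place as it scans; B first filters the qualifying (index, term) pairs, lists the distinct 4-char prefixes in first-occurrence order, and then builds each bucket with a separate comprehension over the pairs.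
import Mathlib
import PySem

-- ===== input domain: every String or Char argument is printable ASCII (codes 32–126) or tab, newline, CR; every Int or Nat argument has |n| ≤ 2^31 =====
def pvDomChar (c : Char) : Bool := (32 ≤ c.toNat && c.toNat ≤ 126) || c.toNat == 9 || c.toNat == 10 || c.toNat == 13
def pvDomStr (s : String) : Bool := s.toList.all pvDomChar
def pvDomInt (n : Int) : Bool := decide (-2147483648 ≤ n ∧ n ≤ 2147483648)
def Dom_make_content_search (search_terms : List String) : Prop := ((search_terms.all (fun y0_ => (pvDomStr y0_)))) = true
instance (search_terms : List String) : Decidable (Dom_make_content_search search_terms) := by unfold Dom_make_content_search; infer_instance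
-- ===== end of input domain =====

-- B replaces A's single hash-bucketing pass (dict updated in place) by a two-pass grouping
-- pipeline — filter the qualifying (index, term) pairs once, list the distinct prefixes in
-- first-occurrence order, then build each bucket by one comprehension per prefix (objective:
-- alternative decomposition, not faster).

-- ===== PORT A =====
-- shared helpers: term[:4] and term.strip().lower()
def pvPfx (t : String) : String := PySem.Str.slice t none (some 4)
def pvVal (t : String) : String := PySem.Str.lower (PySem.Str.strip t)

-- A's loop body ('for i in range(len(search_terms)): term = search_terms[i]; …' iterates the
-- indexed elements, i.e. folds over enumerate(search_terms); 'content_ls[char].update({i: v})'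
-- is d.modify char (insert the single pair))
def pvStepA (d : PySem.Dict String (PySem.Dict Int String)) (p : Int × String) :
    PySem.Dict String (PySem.Dict Int String) :=
  if PySem.Str.len p.2 > 3 then
    if d.contains (pvPfx p.2) then
      d.modify (pvPfx p.2) PySem.Dict.empty (fun inner => inner.insert p.1 (pvVal p.2))
    else
      d.insert (pvPfx p.2) (PySem.Dict.ofList [(p.1, pvVal p.2)])
  else d

def make_content_search (search_terms : List String) : List (String × List (Int × String)) :=
  (((PySem.List.enumerate search_terms).foldl pvStepA PySem.Dict.empty).items).map
    (fun q => (q.1, q.2.items))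

-- ===== PORT B =====
-- pairs = [(i, t) for i, t in enumerate(search_terms) if len(t) > 3]
def pvPairs (search_terms : List String) : List (Int × String) :=
  (PySem.List.enumerate search_terms).filter (fun p => decide (PySem.Str.len p.2 > 3))

-- the 'if t[:4] not in prefixes: prefixes.append(t[:4])' loop (its body is exactly PySem.Set.add)
def pvPrefixes (P : List (Int × String)) : List String :=
  P.foldl (fun ps p => if ps.contains (pvPfx p.2) then ps else ps ++ [pvPfx p.2]) []

-- the inner dict comprehension {i: t.strip().lower() for i, t in pairs if t[:4] == p}
def pvCollect (P : List (Int × String)) (c : String) : List (Int × String) :=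
  (P.filter (fun p => pvPfx p.2 == c)).map (fun p => (p.1, pvVal p.2))

def make_content_search_alt (search_terms : List String) : List (String × List (Int × String)) :=
  (pvPrefixes (pvPairs search_terms)).map (fun c => (c, pvCollect (pvPairs search_terms) c))

-- ===== PRECONDITION & SPEC =====
def Spec_make_content_search (search_terms : List String) (out : List (String × List (Int × String))) : Prop := out = make_content_search_alt search_terms
instance (search_terms : List String) (out : List (String × List (Int × String))) : Decidable (Spec_make_content_search search_terms out) := by unfold Spec_make_content_search; infer_instance

-- ===== CLAIM (what is proved, stated in full; the proofs are below) =====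
def Claim_equal_make_content_search : Prop := ∀ (search_terms : List String), Dom_make_content_search search_terms → Spec_make_content_search search_terms (make_content_search search_terms)

-- ===== LEMMAS AND PROOFS =====

-- the qualified loop body of A (pvStepA once the len>3 guard has been split off)
def pvStepQ (d : PySem.Dict String (PySem.Dict Int String)) (p : Int × String) :
    PySem.Dict String (PySem.Dict Int String) :=
  if d.contains (pvPfx p.2) then
    d.modify (pvPfx p.2) PySem.Dict.empty (fun inner => inner.insert p.1 (pvVal p.2))
  else
    d.insert (pvPfx p.2) (PySem.Dict.ofList [(p.1, pvVal p.2)])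

-- the grouped dict B describes, as a Dict
def pvGrp (P : List (Int × String)) : PySem.Dict String (PySem.Dict Int String) :=
  PySem.Dict.mk ((pvPrefixes P).map (fun c => (c, PySem.Dict.mk (pvCollect P c))))

lemma pvPrefixes_eq_set (P : List (Int × String)) :
    pvPrefixes P = PySem.Set.ofList (P.map (fun p => pvPfx p.2)) := by
  rw [PySem.Set.ofList_eq_foldl, List.foldl_map]
  simp [pvPrefixes, PySem.Set.add]

lemma mem_pvPrefixes (P : List (Int × String)) (c : String) :
    c ∈ pvPrefixes P ↔ ∃ p ∈ P, pvPfx p.2 = c := by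
  rw [pvPrefixes_eq_set, PySem.Set.mem_ofList]
  simp [List.mem_map]

lemma nodup_pvPrefixes (P : List (Int × String)) : (pvPrefixes P).Nodup := by
  rw [pvPrefixes_eq_set]; exact PySem.Set.nodup_ofList _

lemma pvPrefixes_snoc (P : List (Int × String)) (e : Int × String) :
    pvPrefixes (P ++ [e]) =
      if pvPfx e.2 ∈ pvPrefixes P then pvPrefixes P else pvPrefixes P ++ [pvPfx e.2] := by
  unfold pvPrefixes
  rw [List.foldl_append]
  simp [List.foldl]

lemma pvCollect_snoc (P : List (Int × String)) (e : Int × String) (c : String) :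
    pvCollect (P ++ [e]) c =
      pvCollect P c ++ (if pvPfx e.2 = c then [(e.1, pvVal e.2)] else []) := by
  unfold pvCollect
  rw [List.filter_append, List.map_append]
  by_cases h : pvPfx e.2 = c <;> simp [h]

lemma pvCollect_eq_nil (P : List (Int × String)) (c : String) (h : c ∉ pvPrefixes P) :
    pvCollect P c = [] := by
  unfold pvCollect
  rw [List.filter_eq_nil_iff.mpr, List.map_nil]
  intro p hp
  simp only [beq_iff_eq]
  intro hc
  exact h ((mem_pvPrefixes P c).mpr ⟨p, hp, hc⟩)

lemma keys_pvGrp (P : List (Int × String)) : (pvGrp P).keys = pvPrefixes P := by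
  simp [pvGrp, PySem.Dict.keys, List.map_map, Function.comp_def]

lemma contains_pvGrp (P : List (Int × String)) (c : String) :
    (pvGrp P).contains c = true ↔ c ∈ pvPrefixes P := by
  rw [PySem.Dict.contains_iff_mem_keys, keys_pvGrp]

lemma getD_pvGrp (P : List (Int × String)) (c : String) (h : c ∈ pvPrefixes P) :
    (pvGrp P).getD c PySem.Dict.empty = PySem.Dict.mk (pvCollect P c) := by
  apply PySem.Dict.getD_of_mem_items
  · exact List.mem_map.mpr ⟨c, h, rfl⟩
  · rw [keys_pvGrp]; exact nodup_pvPrefixes P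

lemma inner_not_contains (P : List (Int × String)) (c : String) (i : Int)
    (hf : ∀ p ∈ P, p.1 ≠ i) :
    (PySem.Dict.mk (pvCollect P c)).contains i = false := by
  simp only [PySem.Dict.contains, pvCollect, List.any_eq_false]
  rintro q hq
  simp only [List.mem_map, List.mem_filter] at hq
  obtain ⟨p, ⟨hp, -⟩, rfl⟩ := hq
  simpa using hf p hp

lemma pvStepQ_snoc (P : List (Int × String)) (e : Int × String)
    (hf : ∀ p ∈ P, p.1 ≠ e.1) :
    pvStepQ (pvGrp P) e = pvGrp (P ++ [e]) := by
  unfold pvStepQ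
  by_cases hc : pvPfx e.2 ∈ pvPrefixes P
  · rw [if_pos ((contains_pvGrp P _).mpr hc)]
    apply PySem.Dict.ext
    rw [PySem.Dict.modify, PySem.Dict.items_insert_of_contains _ _ ((contains_pvGrp P _).mpr hc)]
    show ((pvPrefixes P).map _).map _ = (pvPrefixes (P ++ [e])).map _
    rw [pvPrefixes_snoc, if_pos hc, List.map_map]
    apply List.map_congr_left
    intro c hcmem
    by_cases hce : c = pvPfx e.2
    · subst hce
      simp only [Function.comp, beq_self_eq_true, if_pos]
      rw [getD_pvGrp P _ hc, pvCollect_snoc, if_pos rfl]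
      refine congrArg _ (PySem.Dict.ext ?_)
      rw [PySem.Dict.items_insert_of_not_contains _ _ (inner_not_contains P _ e.1 hf)]
    · have : (c == pvPfx e.2) = false := beq_false_of_ne hce
      simp only [Function.comp, this, if_false, Bool.false_eq_true]
      rw [pvCollect_snoc, if_neg (fun h => hce h.symm), List.append_nil]
  · rw [if_neg (by simpa using (fun h => hc ((contains_pvGrp P _).mp h)))]
    apply PySem.Dict.ext
    rw [PySem.Dict.items_insert_of_not_contains _ _
      (by rcases h : (pvGrp P).contains (pvPfx e.2) with _ | _
          · rfl
          · exact absurd ((contains_pvGrp P _).mp h) hc)]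
    show ((pvPrefixes P).map _) ++ _ = (pvPrefixes (P ++ [e])).map _
    rw [pvPrefixes_snoc, if_neg hc, List.map_append]
    refine congrArg₂ _ (List.map_congr_left ?_) ?_
    · intro c hcmem
      rw [pvCollect_snoc, if_neg (fun h : pvPfx e.2 = c => hc (h ▸ hcmem)), List.append_nil]
    · simp only [List.map_cons, List.map_nil]
      rw [pvCollect_snoc, if_pos rfl, pvCollect_eq_nil P _ hc]
      rfl

lemma foldl_pvStepQ_eq (P : List (Int × String))
    (h : List.Pairwise (fun p q => p.1 ≠ q.1) P) :
    P.foldl pvStepQ PySem.Dict.empty = pvGrp P := by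
  induction P using List.reverseRecOn with
  | nil => rfl
  | append_singleton P e ih =>
    rw [List.pairwise_append] at h
    rw [List.foldl_append, List.foldl_cons, List.foldl_nil, ih h.1]
    exact pvStepQ_snoc P e (fun p hp => h.2.2 p hp e (List.mem_singleton_self e))

lemma pairwise_ne_pvPairs (xs : List String) :
    List.Pairwise (fun p q => p.1 ≠ q.1) (pvPairs xs) := by
  exact ((PySem.List.pairwise_lt_enumerate xs 0).filter _).imp (fun h => ne_of_lt h)

lemma foldA_eq (xs : List String) :
    (PySem.List.enumerate xs).foldl pvStepA PySem.Dict.empty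
      = (pvPairs xs).foldl pvStepQ PySem.Dict.empty := by
  show (PySem.List.enumerate xs).foldl
      (fun d p => if PySem.Str.len p.2 > 3 then pvStepQ d p else d) PySem.Dict.empty = _
  exact PySem.List.foldl_ite_eq_foldl_filter _ pvStepQ _ _

-- ===== VERDICT (by name: the statement is the Claim_ definition above) =====
theorem make_content_search_spec : Claim_equal_make_content_search := by
  intro xs _
  show make_content_search xs = make_content_search_alt xs
  unfold make_content_search
  rw [foldA_eq, foldl_pvStepQ_eq (pvPairs xs) (pairwise_ne_pvPairs xs)]
  simp only [pvGrp, List.map_map]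
  rfl
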